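-- pv_equiv track=rewrite | github.com/kyrolyte/py-bin | chss/file_fmt_chsmae_dashbq.py | process_paragraphs
-- ===== SOURCE A (Python) =====
-- from typing import List
--
-- def process_paragraphs(lines: List[str]) -> List[str]:
--     """
--     Find each H2 header (##) and add block‑quote markers to the first paragraph
--     that follows it.
--
--     The function walks through the list of lines in order.  When it sees a line
--     that starts with '##' it remembers that position and then looks ahead for
--     the first non‑blank line.  That line starts the paragraph; the paragraph
--     continues until the next blank line.  Every line of that paragraph is
--     prefixed with '> ' (unless it already starts with a block‑quote marker).
--     """
--     i = 0
--     n = len(lines)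
--     while i < n:
--         line = lines[i]
--         if line.lstrip().startswith("##"):
--             # Find first non‑blank line after the header
--             j = i + 1
--             while j < n and lines[j].strip() == "":
--                 j += 1
--
--             if j < n and lines[j].strip() != "":
--                 # Start of the first paragraph
--                 para_start = j
--                 # Find end of paragraph (blank line or EOF)
--                 k = j
--                 while k < n and lines[k].strip() != "":
--                     k += 1
--                 para_end = k  # exclusive
--
--                 # Add block‑quote marker to each line in the paragraph
--                 for p in range(para_start, para_end):
--                     stripped = lines[p].lstrip()
--                     # Avoid double‑quoting if already a block‑quote
--                     if not stripped.startswith(">"):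
--                         lines[p] = "> " + lines[p]
--             i = j
--         else:
--             i += 1
--     return lines
-- ===== SOURCE B (Python) =====
-- from typing import List
--
-- def process_paragraphs(lines: List[str]) -> List[str]:
--     # One forward pass with a mode flag instead of lookahead while-loops.
--     # Mutates lines in place (like the original) and returns the same list.
--     SCAN, EXPECT, IN_PARA = 0, 1, 2
--     mode = SCAN
--     for i in range(len(lines)):
--         line = lines[i]
--         if mode == SCAN:
--             if line.lstrip().startswith("##"):
--                 mode = EXPECT
--         elif line.strip() == "":
--             mode = SCAN if mode == IN_PARA else EXPECT
--         else:
--             if not line.lstrip().startswith(">"):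
--                 lines[i] = "> " + line
--             mode = IN_PARA
--     return lines
-- ===== Notes on version B (the rewrite author's own statement) =====
-- stated objective: simpler
-- what changed: Replaces the nested lookahead while-loops (find first non-blank, find paragraph end, then a quoting for-loop with index rescanning) by a single forward pass over the indices with a three-state mode flag (SCAN/EXPECT_PARA/IN_PARA) that quotes lines as it meets them.
import Mathlib
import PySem

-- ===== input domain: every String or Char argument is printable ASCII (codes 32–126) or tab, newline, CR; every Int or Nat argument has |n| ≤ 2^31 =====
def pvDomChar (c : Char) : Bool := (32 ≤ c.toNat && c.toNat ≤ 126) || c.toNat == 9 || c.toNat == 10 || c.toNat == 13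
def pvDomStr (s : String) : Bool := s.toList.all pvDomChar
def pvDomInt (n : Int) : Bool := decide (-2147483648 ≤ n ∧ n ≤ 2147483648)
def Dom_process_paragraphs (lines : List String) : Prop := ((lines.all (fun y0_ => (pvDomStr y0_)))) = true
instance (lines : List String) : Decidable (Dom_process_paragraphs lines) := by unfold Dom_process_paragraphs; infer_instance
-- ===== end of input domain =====

-- B replaces A's nested lookahead while-loops by a single forward pass with a three-state
-- mode flag (simpler decomposition, same O(n) cost); both mutate the list in place in Python
-- (same per-line assignments), and the equivalence proved here is about the returned list.

-- shared tiny predicates (identical sub-expressions of both Pythons)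
def pvHeader (s : String) : Bool := PySem.Str.startswith (PySem.Str.lstrip s) "##"
def pvBlank (s : String) : Bool := PySem.Str.strip s == ""
def pvQuoted (s : String) : Bool := PySem.Str.startswith (PySem.Str.lstrip s) ">"

-- ===== PORT A =====
-- inner `while j < n and lines[j].strip() == "": j += 1`
def pvSkipBlank (lines : List String) (j : Nat) : Nat :=
  if h : j < lines.length ∧ pvBlank (lines.getD j "") = true then pvSkipBlank lines (j + 1) else j
termination_by lines.length - j
decreasing_by exact Nat.sub_succ_lt_self _ _ h.1

-- inner `while k < n and lines[k].strip() != "": k += 1`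
def pvFindEnd (lines : List String) (k : Nat) : Nat :=
  if h : k < lines.length ∧ pvBlank (lines.getD k "") = false then pvFindEnd lines (k + 1) else k
termination_by lines.length - k
decreasing_by exact Nat.sub_succ_lt_self _ _ h.1

-- `for p in range(para_start, para_end): if not lines[p].lstrip().startswith(">"): lines[p] = "> " + lines[p]`
def pvQuoteRange (lines : List String) (p pend : Nat) : List String :=
  if h : p < pend then
    pvQuoteRange (if pvQuoted (lines.getD p "") then lines else lines.set p ("> " ++ lines.getD p "")) (p + 1) pend
  else lines
termination_by pend - p
decreasing_by exact Nat.sub_succ_lt_self _ _ h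

-- two facts the outer loop's termination argument cites
theorem pvSkipBlank_ge (lines : List String) (j : Nat) : j ≤ pvSkipBlank lines j := by
  unfold pvSkipBlank
  split
  · rename_i hc
    exact Nat.le_trans (Nat.le_succ j) (pvSkipBlank_ge lines (j + 1))
  · exact Nat.le_refl j
termination_by lines.length - j
decreasing_by rename_i hc; exact Nat.sub_succ_lt_self _ _ hc.1

theorem pvQuoteRange_length (lines : List String) (p pend : Nat) :
    (pvQuoteRange lines p pend).length = lines.length := by
  unfold pvQuoteRange
  split
  · rw [pvQuoteRange_length]
    split
    · rfl
    · exact List.length_set ..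
  · rfl
termination_by pend - p
decreasing_by rename_i hp; exact Nat.sub_succ_lt_self _ _ hp

-- the outer `while i < n` loop of A
def pvLoopA (lines : List String) (i : Nat) : List String :=
  if h : i < lines.length then
    if pvHeader (lines.getD i "") then
      if h2 : pvSkipBlank lines (i + 1) < lines.length ∧
              pvBlank (lines.getD (pvSkipBlank lines (i + 1)) "") = false then
        pvLoopA (pvQuoteRange lines (pvSkipBlank lines (i + 1)) (pvFindEnd lines (pvSkipBlank lines (i + 1))))
          (pvSkipBlank lines (i + 1))
      else pvLoopA lines (pvSkipBlank lines (i + 1))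
    else pvLoopA lines (i + 1)
  else lines
termination_by lines.length - i
decreasing_by
  · rw [pvQuoteRange_length]
    exact Nat.sub_lt_sub_left h (Nat.lt_of_lt_of_le (Nat.lt_succ_self i) (pvSkipBlank_ge lines (i + 1)))
  · exact Nat.sub_lt_sub_left h (Nat.lt_of_lt_of_le (Nat.lt_succ_self i) (pvSkipBlank_ge lines (i + 1)))
  · exact Nat.sub_succ_lt_self _ _ h

def process_paragraphs (lines : List String) : List String := pvLoopA lines 0

-- ===== PORT B =====
inductive PvMode | scan | expect | inpara
deriving DecidableEq

-- B's single forward pass: one index, a mode flag, quoting as it goes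
def pvLoopB (lines : List String) (i : Nat) (mode : PvMode) : List String :=
  if h : i < lines.length then
    match mode with
    | .scan => pvLoopB lines (i + 1) (if pvHeader (lines.getD i "") then .expect else .scan)
    | .expect =>
      if pvBlank (lines.getD i "") then pvLoopB lines (i + 1) .expect
      else pvLoopB (if pvQuoted (lines.getD i "") then lines else lines.set i ("> " ++ lines.getD i ""))
        (i + 1) .inpara
    | .inpara =>
      if pvBlank (lines.getD i "") then pvLoopB lines (i + 1) .scan
      else pvLoopB (if pvQuoted (lines.getD i "") then lines else lines.set i ("> " ++ lines.getD i ""))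
        (i + 1) .inpara
  else lines
termination_by lines.length - i
decreasing_by
  · exact Nat.sub_succ_lt_self _ _ h
  · exact Nat.sub_succ_lt_self _ _ h
  · split
    · exact Nat.sub_succ_lt_self _ _ h
    · rw [List.length_set]; exact Nat.sub_succ_lt_self _ _ h
  · exact Nat.sub_succ_lt_self _ _ h
  · split
    · exact Nat.sub_succ_lt_self _ _ h
    · rw [List.length_set]; exact Nat.sub_succ_lt_self _ _ h

def process_paragraphs_alt (lines : List String) : List String := pvLoopB lines 0 .scan

-- ===== PRECONDITION & SPEC =====
def Spec_process_paragraphs (lines : List String) (out : List String) : Prop := out = process_paragraphs_alt lines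
instance (lines : List String) (out : List String) : Decidable (Spec_process_paragraphs lines out) := by unfold Spec_process_paragraphs; infer_instance

-- ===== CLAIM (what is proved, stated in full; the proofs are below) =====
def Claim_equal_process_paragraphs : Prop := ∀ (lines : List String), Dom_process_paragraphs lines → Spec_process_paragraphs lines (process_paragraphs lines)

-- ===== LEMMAS AND PROOFS =====

-- ---- character-level facts ----

theorem pvStartswith_gt_not_hash (l : List Char) (h : PySem.Chars.startswith l ['>'] = true) :
    PySem.Chars.startswith l ['#', '#'] = false := by
  rw [PySem.Chars.startswith_iff] at h
  obtain ⟨t, ht⟩ := h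
  rw [← Bool.not_eq_true, PySem.Chars.startswith_iff, ← ht]
  intro hpre
  obtain ⟨u, hu⟩ := hpre
  simp at hu

theorem pvDropWhile_head_false (p : Char → Bool) (l : List Char) (c : Char) (t : List Char)
    (h : l.dropWhile p = c :: t) : p c = false := by
  induction l with
  | nil => simp at h
  | cons a as ih =>
    rw [List.dropWhile_cons] at h
    by_cases hp : p a = true
    · rw [if_pos hp] at h; exact ih h
    · rw [if_neg hp] at h
      cases h
      simpa using hp

theorem pvStrip_nil_lstrip (l : List Char) (h : PySem.Chars.strip l = []) :
    PySem.Chars.lstrip l = [] := by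
  have hall : ∀ a ∈ PySem.Chars.lstrip l, PySem.Chars.isspace a = true := by
    intro a ha
    unfold PySem.Chars.strip PySem.Chars.rstrip at h
    have h1 : (PySem.Chars.lstrip l).reverse.dropWhile PySem.Chars.isspace = [] := by
      simpa [List.reverse_eq_nil_iff] using congrArg List.reverse h
    exact List.dropWhile_eq_nil_iff.mp h1 a (by simpa using ha)
  cases hd : PySem.Chars.lstrip l with
  | nil => rfl
  | cons c t =>
    exfalso
    have hc : PySem.Chars.isspace c = true := hall c (by rw [hd]; exact List.mem_cons_self)
    have hcf : PySem.Chars.isspace c = false := by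
      unfold PySem.Chars.lstrip at hd
      exact pvDropWhile_head_false _ _ _ _ hd
    rw [hc] at hcf; cases hcf

theorem pvLstrip_gtspace (s : String) :
    PySem.Chars.lstrip ("> " ++ s).toList = '>' :: ' ' :: s.toList := by
  have h : ("> " ++ s).toList = '>' :: ' ' :: s.toList := by
    simp [String.toList_append]
  rw [h]
  simp [PySem.Chars.lstrip, show PySem.Chars.isspace '>' = false from by decide]

theorem pvQuoted_not_header (s : String) (h : pvQuoted s = true) : pvHeader s = false := by
  unfold pvQuoted at h; unfold pvHeader
  simp only [PySem.Str.startswith_eq, PySem.Str.toList_lstrip] at h ⊢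
  rw [show ("##" : String).toList = ['#', '#'] from by decide]
  rw [show (">" : String).toList = ['>'] from by decide] at h
  exact pvStartswith_gt_not_hash _ h

theorem pvQuote2_not_header (s : String) : pvHeader ("> " ++ s) = false := by
  unfold pvHeader
  simp only [PySem.Str.startswith_eq, PySem.Str.toList_lstrip]
  rw [pvLstrip_gtspace, show ("##" : String).toList = ['#', '#'] from by decide]
  exact pvStartswith_gt_not_hash _ (by simp [PySem.Chars.startswith, List.isPrefixOf])

theorem pvBlank_not_header (s : String) (h : pvBlank s = true) : pvHeader s = false := by
  unfold pvBlank at h; unfold pvHeader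
  have h0 : PySem.Str.strip s = "" := by simpa using h
  have h1 : PySem.Chars.strip s.toList = [] := by
    have h2 := congrArg String.toList h0
    simpa using h2
  have h3 := pvStrip_nil_lstrip _ h1
  simp only [PySem.Str.startswith_eq, PySem.Str.toList_lstrip, h3]
  decide

-- ---- the per-line quoting step shared by both loops ----

def pvQuote (s : String) : String := if pvQuoted s then s else "> " ++ s

def pvQStep (lines : List String) (i : Nat) : List String :=
  if pvQuoted (lines.getD i "") then lines else lines.set i ("> " ++ lines.getD i "")

theorem pvQuote_not_header (s : String) : pvHeader (pvQuote s) = false := by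
  by_cases hq : pvQuoted s = true
  · simp only [pvQuote, if_pos hq]; exact pvQuoted_not_header s hq
  · simp only [pvQuote, if_neg hq]; exact pvQuote2_not_header s

theorem pvGetD_set_self (l : List String) (i : Nat) (v : String) (h : i < l.length) :
    (l.set i v).getD i "" = v := by
  simp [List.getD_eq_getElem?_getD, h]

theorem pvGetD_set_ne (l : List String) (i p : Nat) (v : String) (h : i ≠ p) :
    (l.set i v).getD p "" = l.getD p "" := by
  simp [List.getD_eq_getElem?_getD, h]

theorem pvQStep_length (lines : List String) (i : Nat) : (pvQStep lines i).length = lines.length := by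
  unfold pvQStep; split <;> simp

theorem pvQStep_getD_ne (lines : List String) (i p : Nat) (h : i ≠ p) :
    (pvQStep lines i).getD p "" = lines.getD p "" := by
  unfold pvQStep; split
  · rfl
  · exact pvGetD_set_ne lines i p _ h

theorem pvQStep_getD_self (lines : List String) (i : Nat) (h : i < lines.length) :
    (pvQStep lines i).getD i "" = pvQuote (lines.getD i "") := by
  unfold pvQStep pvQuote
  by_cases hq : pvQuoted (lines.getD i "") = true
  · rw [if_pos hq, if_pos hq]
  · rw [if_neg hq, if_neg hq]
    exact pvGetD_set_self lines i _ h

-- ---- pvSkipBlank / pvFindEnd characterisation ----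

theorem pvSkipBlank_le (lines : List String) (j : Nat) (h : j ≤ lines.length) :
    pvSkipBlank lines j ≤ lines.length := by
  unfold pvSkipBlank
  split
  · exact pvSkipBlank_le lines (j + 1) (by omega)
  · exact h
termination_by lines.length - j
decreasing_by omega

theorem pvSkipBlank_blank (lines : List String) (j : Nat) :
    ∀ p, j ≤ p → p < pvSkipBlank lines j → pvBlank (lines.getD p "") = true := by
  intro p hp hlt
  rw [pvSkipBlank] at hlt
  split at hlt
  · rcases Nat.eq_or_lt_of_le hp with he | hl
    · subst he; rename_i hc; exact hc.2
    · exact pvSkipBlank_blank lines (j + 1) p hl hlt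
  · omega
termination_by lines.length - j
decreasing_by rename_i hc _ _; omega

theorem pvSkipBlank_pos (lines : List String) (j : Nat)
    (hc : j < lines.length ∧ pvBlank (lines.getD j "") = true) :
    pvSkipBlank lines j = pvSkipBlank lines (j + 1) := by
  conv_lhs => rw [pvSkipBlank]
  rw [dif_pos hc]

theorem pvSkipBlank_neg (lines : List String) (j : Nat)
    (hc : ¬(j < lines.length ∧ pvBlank (lines.getD j "") = true)) :
    pvSkipBlank lines j = j := by
  rw [pvSkipBlank, dif_neg hc]

theorem pvSkipBlank_stop (lines : List String) (j : Nat)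
    (h : pvSkipBlank lines j < lines.length) :
    pvBlank (lines.getD (pvSkipBlank lines j) "") = false := by
  by_cases hc : j < lines.length ∧ pvBlank (lines.getD j "") = true
  · rw [pvSkipBlank_pos lines j hc] at h ⊢
    exact pvSkipBlank_stop lines (j + 1) h
  · rw [pvSkipBlank_neg lines j hc] at h ⊢
    cases hx : pvBlank (lines.getD j "") with
    | false => rfl
    | true => exact absurd ⟨h, hx⟩ hc
termination_by lines.length - j
decreasing_by omega

theorem pvFindEnd_ge (lines : List String) (k : Nat) : k ≤ pvFindEnd lines k := by
  unfold pvFindEnd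
  split
  · have := pvFindEnd_ge lines (k + 1); omega
  · omega
termination_by lines.length - k
decreasing_by omega

theorem pvFindEnd_le (lines : List String) (k : Nat) (h : k ≤ lines.length) :
    pvFindEnd lines k ≤ lines.length := by
  unfold pvFindEnd
  split
  · exact pvFindEnd_le lines (k + 1) (by omega)
  · exact h
termination_by lines.length - k
decreasing_by omega

theorem pvFindEnd_nonblank (lines : List String) (k : Nat) :
    ∀ p, k ≤ p → p < pvFindEnd lines k → pvBlank (lines.getD p "") = false := by
  intro p hp hlt
  rw [pvFindEnd] at hlt
  split at hlt
  · rcases Nat.eq_or_lt_of_le hp with he | hl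
    · subst he; rename_i hc; exact hc.2
    · exact pvFindEnd_nonblank lines (k + 1) p hl hlt
  · omega
termination_by lines.length - k
decreasing_by rename_i hc _ _; omega

theorem pvFindEnd_pos (lines : List String) (k : Nat)
    (hc : k < lines.length ∧ pvBlank (lines.getD k "") = false) :
    pvFindEnd lines k = pvFindEnd lines (k + 1) := by
  conv_lhs => rw [pvFindEnd]
  rw [dif_pos hc]

theorem pvFindEnd_neg (lines : List String) (k : Nat)
    (hc : ¬(k < lines.length ∧ pvBlank (lines.getD k "") = false)) :
    pvFindEnd lines k = k := by
  rw [pvFindEnd, dif_neg hc]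

theorem pvFindEnd_stop (lines : List String) (k : Nat)
    (h : pvFindEnd lines k < lines.length) :
    pvBlank (lines.getD (pvFindEnd lines k) "") = true := by
  by_cases hc : k < lines.length ∧ pvBlank (lines.getD k "") = false
  · rw [pvFindEnd_pos lines k hc] at h ⊢
    exact pvFindEnd_stop lines (k + 1) h
  · rw [pvFindEnd_neg lines k hc] at h ⊢
    cases hx : pvBlank (lines.getD k "") with
    | true => rfl
    | false => exact absurd ⟨h, hx⟩ hc
termination_by lines.length - k
decreasing_by omega

-- ---- pvQuoteRange characterisation ----

theorem pvQuoteRange_step (lines : List String) (p pend : Nat) (h : p < pend) :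
    pvQuoteRange lines p pend = pvQuoteRange (pvQStep lines p) (p + 1) pend := by
  conv_lhs => rw [pvQuoteRange]
  rw [dif_pos h]
  rfl

theorem pvQuoteRange_nil (lines : List String) (p pend : Nat) (h : pend ≤ p) :
    pvQuoteRange lines p pend = lines := by
  rw [pvQuoteRange, dif_neg (by omega)]

theorem pvQuoteRange_getD_out (lines : List String) (p pend r : Nat) (h : r < p ∨ pend ≤ r) :
    (pvQuoteRange lines p pend).getD r "" = lines.getD r "" := by
  by_cases hp : p < pend
  · rw [pvQuoteRange_step lines p pend hp,
      pvQuoteRange_getD_out (pvQStep lines p) (p + 1) pend r (by omega),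
      pvQStep_getD_ne lines p r (by omega)]
  · rw [pvQuoteRange_nil lines p pend (by omega)]
termination_by pend - p
decreasing_by omega

theorem pvQuoteRange_getD_in (lines : List String) (p pend r : Nat)
    (h1 : p ≤ r) (h2 : r < pend) (h3 : pend ≤ lines.length) :
    (pvQuoteRange lines p pend).getD r "" = pvQuote (lines.getD r "") := by
  have hp : p < pend := by omega
  rw [pvQuoteRange_step lines p pend hp]
  rcases Nat.eq_or_lt_of_le h1 with he | hl
  · subst he
    rw [pvQuoteRange_getD_out (pvQStep lines p) (p + 1) pend p (by omega)]
    exact pvQStep_getD_self lines p (by omega)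
  · rw [pvQuoteRange_getD_in (pvQStep lines p) (p + 1) pend r (by omega) h2
      (by rw [pvQStep_length]; exact h3)]
    rw [pvQStep_getD_ne lines p r (by omega)]
termination_by pend - p
decreasing_by omega

-- ---- step lemmas for the two loops ----

theorem pvLoopA_end (lines : List String) (i : Nat) (h : lines.length ≤ i) :
    pvLoopA lines i = lines := by
  rw [pvLoopA, dif_neg (by omega)]

theorem pvLoopA_nonheader (lines : List String) (i : Nat) (h : i < lines.length)
    (hh : pvHeader (lines.getD i "") = false) :
    pvLoopA lines i = pvLoopA lines (i + 1) := by
  conv_lhs => rw [pvLoopA]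
  rw [dif_pos h, if_neg (by simp only [hh]; decide)]

theorem pvLoopB_end (lines : List String) (i : Nat) (mode : PvMode) (h : lines.length ≤ i) :
    pvLoopB lines i mode = lines := by
  rw [pvLoopB.eq_def, dif_neg (by omega)]

theorem pvLoopB_scan (lines : List String) (i : Nat) (h : i < lines.length) :
    pvLoopB lines i .scan = pvLoopB lines (i + 1) (if pvHeader (lines.getD i "") then .expect else .scan) := by
  rw [pvLoopB.eq_def, dif_pos h]

theorem pvLoopB_expect_blank (lines : List String) (i : Nat) (h : i < lines.length)
    (hb : pvBlank (lines.getD i "") = true) :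
    pvLoopB lines i .expect = pvLoopB lines (i + 1) .expect := by
  rw [pvLoopB.eq_def, dif_pos h]
  show (if pvBlank (lines.getD i "") = true then pvLoopB lines (i + 1) .expect
    else pvLoopB (if pvQuoted (lines.getD i "") then lines else lines.set i ("> " ++ lines.getD i ""))
      (i + 1) .inpara) = _
  rw [if_pos hb]

theorem pvLoopB_expect_nonblank (lines : List String) (i : Nat) (h : i < lines.length)
    (hb : pvBlank (lines.getD i "") = false) :
    pvLoopB lines i .expect = pvLoopB (pvQStep lines i) (i + 1) .inpara := by
  rw [pvLoopB.eq_def, dif_pos h]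
  show (if pvBlank (lines.getD i "") = true then pvLoopB lines (i + 1) .expect
    else pvLoopB (if pvQuoted (lines.getD i "") then lines else lines.set i ("> " ++ lines.getD i ""))
      (i + 1) .inpara) = _
  rw [if_neg (by simp only [hb]; decide)]
  rfl

theorem pvLoopB_inpara_blank (lines : List String) (i : Nat) (h : i < lines.length)
    (hb : pvBlank (lines.getD i "") = true) :
    pvLoopB lines i .inpara = pvLoopB lines (i + 1) .scan := by
  rw [pvLoopB.eq_def, dif_pos h]
  show (if pvBlank (lines.getD i "") = true then pvLoopB lines (i + 1) .scan
    else pvLoopB (if pvQuoted (lines.getD i "") then lines else lines.set i ("> " ++ lines.getD i ""))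
      (i + 1) .inpara) = _
  rw [if_pos hb]

theorem pvLoopB_inpara_nonblank (lines : List String) (i : Nat) (h : i < lines.length)
    (hb : pvBlank (lines.getD i "") = false) :
    pvLoopB lines i .inpara = pvLoopB (pvQStep lines i) (i + 1) .inpara := by
  rw [pvLoopB.eq_def, dif_pos h]
  show (if pvBlank (lines.getD i "") = true then pvLoopB lines (i + 1) .scan
    else pvLoopB (if pvQuoted (lines.getD i "") then lines else lines.set i ("> " ++ lines.getD i ""))
      (i + 1) .inpara) = _
  rw [if_neg (by simp only [hb]; decide)]
  rfl

-- ---- segment lemmas ----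

-- A's outer loop walks over a stretch of non-header lines without changing anything
theorem pvLoopA_skip (lines : List String) (j k : Nat) (hjk : j ≤ k) (hk : k ≤ lines.length)
    (hh : ∀ p, j ≤ p → p < k → pvHeader (lines.getD p "") = false) :
    pvLoopA lines j = pvLoopA lines k := by
  rcases Nat.lt_or_ge j k with h | h
  · rw [pvLoopA_nonheader lines j (by omega) (hh j le_rfl h)]
    exact pvLoopA_skip lines (j + 1) k (by omega) hk (fun p h1 h2 => hh p (by omega) h2)
  · have : j = k := by omega
    rw [this]
termination_by k - j
decreasing_by omega

-- B in EXPECT mode walks over blank lines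
theorem pvLoopB_skipBlanks (lines : List String) (m j : Nat) (hm : m ≤ j) (hj : j ≤ lines.length)
    (hb : ∀ p, m ≤ p → p < j → pvBlank (lines.getD p "") = true) :
    pvLoopB lines m .expect = pvLoopB lines j .expect := by
  rcases Nat.lt_or_ge m j with h | h
  · rw [pvLoopB_expect_blank lines m (by omega) (hb m le_rfl h)]
    exact pvLoopB_skipBlanks lines (m + 1) j (by omega) hj (fun p h1 h2 => hb p (by omega) h2)
  · have : m = j := by omega
    rw [this]
termination_by j - m
decreasing_by omega

-- B in IN_PARA mode quotes a stretch of non-blank lines, line by line = pvQuoteRange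
theorem pvLoopB_quotePara (lines : List String) (m k : Nat) (hm : m ≤ k) (hk : k ≤ lines.length)
    (hb : ∀ p, m ≤ p → p < k → pvBlank (lines.getD p "") = false) :
    pvLoopB lines m .inpara = pvLoopB (pvQuoteRange lines m k) k .inpara := by
  rcases Nat.lt_or_ge m k with h | h
  · rw [pvLoopB_inpara_nonblank lines m (by omega) (hb m le_rfl h)]
    rw [pvQuoteRange_step lines m k h]
    exact pvLoopB_quotePara (pvQStep lines m) (m + 1) k (by omega)
      (by rw [pvQStep_length]; exact hk)
      (fun p h1 h2 => by
        rw [pvQStep_getD_ne lines m p (by omega)]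
        exact hb p (by omega) h2)
  · have : m = k := by omega
    subst this
    rw [pvQuoteRange_nil lines m m le_rfl]
termination_by k - m
decreasing_by omega

-- ---- main bridge ----

theorem pvLoopAB (lines : List String) (i : Nat) : pvLoopA lines i = pvLoopB lines i .scan := by
  by_cases h : i < lines.length
  · by_cases hh : pvHeader (lines.getD i "") = true
    · -- header at i
      have hjge : i + 1 ≤ pvSkipBlank lines (i + 1) := pvSkipBlank_ge lines (i + 1)
      have hjle : pvSkipBlank lines (i + 1) ≤ lines.length := pvSkipBlank_le lines (i + 1) (by omega)
      conv_lhs => rw [pvLoopA]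
      rw [dif_pos h, if_pos hh, pvLoopB_scan lines i h, if_pos hh,
        pvLoopB_skipBlanks lines (i + 1) (pvSkipBlank lines (i + 1)) hjge hjle
          (pvSkipBlank_blank lines (i + 1))]
      by_cases h2 : pvSkipBlank lines (i + 1) < lines.length ∧
          pvBlank (lines.getD (pvSkipBlank lines (i + 1)) "") = false
      · rw [dif_pos h2]
        have hkge : pvSkipBlank lines (i + 1) ≤ pvFindEnd lines (pvSkipBlank lines (i + 1)) :=
          pvFindEnd_ge lines (pvSkipBlank lines (i + 1))
        have hkle : pvFindEnd lines (pvSkipBlank lines (i + 1)) ≤ lines.length :=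
          pvFindEnd_le lines (pvSkipBlank lines (i + 1)) (by omega)
        have hnon := pvFindEnd_nonblank lines (pvSkipBlank lines (i + 1))
        have hL'len : (pvQuoteRange lines (pvSkipBlank lines (i + 1))
            (pvFindEnd lines (pvSkipBlank lines (i + 1)))).length = lines.length :=
          pvQuoteRange_length lines _ _
        rw [pvLoopB_expect_nonblank lines (pvSkipBlank lines (i + 1)) h2.1 h2.2,
          ← pvLoopB_inpara_nonblank lines (pvSkipBlank lines (i + 1)) h2.1 h2.2,
          pvLoopB_quotePara lines (pvSkipBlank lines (i + 1))
            (pvFindEnd lines (pvSkipBlank lines (i + 1))) hkge hkle hnon]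
        have hdrs : ∀ p, pvSkipBlank lines (i + 1) ≤ p →
            p < pvFindEnd lines (pvSkipBlank lines (i + 1)) →
            pvHeader ((pvQuoteRange lines (pvSkipBlank lines (i + 1))
              (pvFindEnd lines (pvSkipBlank lines (i + 1)))).getD p "") = false := by
          intro p hp1 hp2
          rw [pvQuoteRange_getD_in lines _ _ p hp1 hp2 hkle]
          exact pvQuote_not_header _
        by_cases hkl : pvFindEnd lines (pvSkipBlank lines (i + 1)) < lines.length
        · -- paragraph ends at a blank line
          have hbk : pvBlank (lines.getD (pvFindEnd lines (pvSkipBlank lines (i + 1))) "") = true :=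
            pvFindEnd_stop lines (pvSkipBlank lines (i + 1)) hkl
          have hbk' : pvBlank ((pvQuoteRange lines (pvSkipBlank lines (i + 1))
              (pvFindEnd lines (pvSkipBlank lines (i + 1)))).getD
                (pvFindEnd lines (pvSkipBlank lines (i + 1))) "") = true := by
            rw [pvQuoteRange_getD_out lines _ _ _ (Or.inr le_rfl)]; exact hbk
          rw [pvLoopA_skip _ (pvSkipBlank lines (i + 1))
              (pvFindEnd lines (pvSkipBlank lines (i + 1)) + 1) (by omega) (by omega)
              (by
                intro p hp1 hp2
                rcases Nat.lt_or_ge p (pvFindEnd lines (pvSkipBlank lines (i + 1))) with hc | hc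
                · exact hdrs p hp1 hc
                · have : p = pvFindEnd lines (pvSkipBlank lines (i + 1)) := by omega
                  subst this
                  rw [pvQuoteRange_getD_out lines _ _ _ (Or.inr le_rfl)]
                  exact pvBlank_not_header _ hbk),
            pvLoopB_inpara_blank _ _ (by omega) hbk']
          exact pvLoopAB _ (pvFindEnd lines (pvSkipBlank lines (i + 1)) + 1)
        · -- paragraph runs to the end of the file
          have hke : pvFindEnd lines (pvSkipBlank lines (i + 1)) = lines.length := by omega
          rw [pvLoopA_skip _ (pvSkipBlank lines (i + 1))
              (pvFindEnd lines (pvSkipBlank lines (i + 1))) hkge (by omega) hdrs,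
            pvLoopA_end _ _ (by omega), pvLoopB_end _ _ _ (by omega)]
      · rw [dif_neg h2]
        have hje : pvSkipBlank lines (i + 1) = lines.length := by
          rcases Nat.lt_or_ge (pvSkipBlank lines (i + 1)) lines.length with hl | hg
          · exact absurd ⟨hl, pvSkipBlank_stop lines (i + 1) hl⟩ h2
          · omega
        rw [hje, pvLoopA_end _ _ le_rfl, pvLoopB_end _ _ _ le_rfl]
    · -- not a header at i
      have hh' : pvHeader (lines.getD i "") = false := by
        cases hx : pvHeader (lines.getD i "") with
        | false => rfl
        | true => exact absurd hx hh
      rw [pvLoopA_nonheader lines i h hh', pvLoopB_scan lines i h, if_neg (by simp only [hh']; decide)]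
      exact pvLoopAB lines (i + 1)
  · rw [pvLoopA_end lines i (by omega), pvLoopB_end lines i .scan (by omega)]
termination_by lines.length - i
decreasing_by all_goals omega

-- ===== VERDICT (by name: the statement is the Claim_ definition above) =====
theorem process_paragraphs_spec : Claim_equal_process_paragraphs := by
  intro lines _
  unfold Spec_process_paragraphs process_paragraphs process_paragraphs_alt
  exact pvLoopAB lines 0
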